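-- pv_equiv track=rewrite | github.com/coandco/advent2025 | advent2025_day01.py | part_two
-- ===== SOURCE A (Python) =====
-- def part_two(ops: list[int]) -> int:
--     num_zeroes = 0
--     cur_val = 50
--     for op in ops:
--         # make an array of all the numbers the op covers, filter it down to just the zeroes, and count it
--         zeroes_in_op = sum(1 for x in range(cur_val, cur_val + op, op // abs(op)) if x % 100 == 0)
--         num_zeroes += zeroes_in_op
--         cur_val += op
--         cur_val %= 100
--     return num_zeroes
-- ===== SOURCE B (Python) =====
-- # B: O(1) arithmetic per op (floor-division count of multiples of 100 in the
-- # half-open range each op sweeps) instead of enumerating every step.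
-- def _crossings(cur: int, op: int) -> int:
--     if op > 0:
--         return (cur + op - 1) // 100 - (cur - 1) // 100
--     return cur // 100 - (cur + op) // 100
--
-- def part_two(ops: list[int]) -> int:
--     count = 0
--     cur = 50
--     for op in ops:
--         count += _crossings(cur, op)
--         cur = (cur + op) % 100
--     return count
-- ===== Notes on version B (the rewrite author's own statement) =====
-- stated objective: faster
-- what changed: B replaces A's per-step enumeration of every integer the op sweeps with a closed-form floor-division count of multiples of 100 in each half-open range.
import Mathlib
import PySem

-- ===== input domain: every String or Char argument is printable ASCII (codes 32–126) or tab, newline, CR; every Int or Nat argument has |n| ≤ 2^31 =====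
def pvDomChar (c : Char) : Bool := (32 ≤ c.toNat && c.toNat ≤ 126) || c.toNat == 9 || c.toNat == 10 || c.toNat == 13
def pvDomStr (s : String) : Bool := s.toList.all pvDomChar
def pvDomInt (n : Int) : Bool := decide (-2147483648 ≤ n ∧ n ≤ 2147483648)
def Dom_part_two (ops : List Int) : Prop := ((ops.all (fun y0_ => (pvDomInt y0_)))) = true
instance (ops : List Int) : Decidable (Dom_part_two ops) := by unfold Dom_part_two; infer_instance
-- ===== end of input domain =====

-- ===== PORT A =====
-- literal port of A: enumerate range(cur_val, cur_val + op, op // abs(op)), count x with x % 100 == 0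
def part_two (ops : List Int) : Int :=
  let st := ops.foldl (fun (st : Int × Int) op =>
      let zeroes_in_op :=
        ((PySem.List.pyRange st.2 (st.2 + op) (PySem.Int.floordiv op |op|)).map
          (fun x => if PySem.Int.mod x 100 = 0 then (1 : Int) else 0)).sum
      (st.1 + zeroes_in_op, PySem.Int.mod (st.2 + op) 100)) (0, 50)
  st.1

-- ===== PORT B =====
-- closed-form count of multiples of 100 in the half-open interval the op sweeps
def crossings (cur op : Int) : Int :=
  if 0 < op then
    PySem.Int.floordiv (cur + op - 1) 100 - PySem.Int.floordiv (cur - 1) 100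
  else
    PySem.Int.floordiv cur 100 - PySem.Int.floordiv (cur + op) 100

def part_two_alt (ops : List Int) : Int :=
  (ops.foldl (fun (st : Int × Int) op =>
      (st.1 + crossings st.2 op, PySem.Int.mod (st.2 + op) 100)) (0, 50)).1

-- ===== PRECONDITION & SPEC =====
-- A computes op // abs(op), which raises ZeroDivisionError when op = 0
def Pre_part_two (ops : List Int) : Prop := (0 : Int) ∉ ops
instance (ops : List Int) : Decidable (Pre_part_two ops) := by unfold Pre_part_two; infer_instance
def pvWitness_part_two : List Int := [30, -75, 200]

def Spec_part_two (ops : List Int) (out : Int) : Prop := out = part_two_alt ops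
instance (ops : List Int) (out : Int) : Decidable (Spec_part_two ops out) := by unfold Spec_part_two; infer_instance

-- ===== CLAIM (what is proved, stated in full; the proofs are below) =====
def Claim_equal_part_two : Prop := ∀ (ops : List Int), Dom_part_two ops → Pre_part_two ops → Spec_part_two ops (part_two ops)

-- ===== LEMMAS AND PROOFS =====

-- one increasing step of the interval adds exactly the indicator of 100 ∣ x
lemma fd_step (x : Int) :
    PySem.Int.floordiv x 100 - PySem.Int.floordiv (x - 1) 100
      = (if PySem.Int.mod x 100 = 0 then (1 : Int) else 0) := by
  rw [PySem.Int.floordiv_eq_ediv_of_pos (by norm_num), PySem.Int.floordiv_eq_ediv_of_pos (by norm_num),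
      PySem.Int.mod_eq_emod_of_pos (by norm_num)]
  split_ifs with h <;> omega

-- upward sweep: count of multiples of 100 in [c, c+n)
lemma count_up (n : Nat) : ∀ (c : Int),
    ((PySem.List.pyRange c (c + n) 1).map
      (fun x => if PySem.Int.mod x 100 = 0 then (1 : Int) else 0)).sum
      = PySem.Int.floordiv (c + n - 1) 100 - PySem.Int.floordiv (c - 1) 100 := by
  induction n with
  | zero =>
    intro c
    rw [Nat.cast_zero, add_zero, PySem.List.pyRange_one_eq_nil le_rfl]
    simp
  | succ m ih =>
    intro c
    have hsplit : PySem.List.pyRange c (c + (m + 1 : Nat)) 1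
        = PySem.List.pyRange c (c + m) 1 ++ [c + m] := by
      have : (c : Int) + (m + 1 : Nat) = (c + m) + 1 := by push_cast; ring
      rw [this, PySem.List.pyRange_one_succ_right (by omega)]
    rw [hsplit, List.map_append, List.sum_append, ih c]
    have he : (c : Int) + (m + 1 : Nat) - 1 = c + m := by push_cast; ring
    rw [he]
    have := fd_step (c + m)
    simp only [List.map_cons, List.map_nil, List.sum_cons, List.sum_nil]
    omega
  
-- downward sweep: count of multiples of 100 in (c-n, c]
lemma count_down (n : Nat) : ∀ (c : Int),
    ((PySem.List.pyRange c (c - n) (-1)).map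
      (fun x => if PySem.Int.mod x 100 = 0 then (1 : Int) else 0)).sum
      = PySem.Int.floordiv c 100 - PySem.Int.floordiv (c - n) 100 := by
  induction n with
  | zero =>
    intro c
    rw [Nat.cast_zero, sub_zero, PySem.List.pyRange_neg_one_eq_nil le_rfl]
    simp
  | succ m ih =>
    intro c
    rw [PySem.List.pyRange_neg_one_cons (by push_cast; omega)]
    have harg : (c : Int) - (m + 1 : Nat) = (c - 1) - m := by push_cast; ring
    rw [List.map_cons, List.sum_cons, harg, ih (c - 1)]
    have := fd_step c
    omega

lemma floordiv_sign_pos {op : Int} (h : 0 < op) : PySem.Int.floordiv op |op| = 1 := by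
  rw [abs_of_pos h, PySem.Int.floordiv_eq_ediv_of_pos h, Int.ediv_self (by omega)]

lemma floordiv_sign_neg {op : Int} (h : op < 0) : PySem.Int.floordiv op |op| = -1 := by
  rw [abs_of_neg h, (PySem.Int.floordiv_eq_iff_of_pos (by omega)).2]
  constructor <;> omega

-- the per-op counts of the two programs agree for op ≠ 0
lemma step_count (c op : Int) (h : op ≠ 0) :
    ((PySem.List.pyRange c (c + op) (PySem.Int.floordiv op |op|)).map
      (fun x => if PySem.Int.mod x 100 = 0 then (1 : Int) else 0)).sum
      = crossings c op := by
  rcases lt_or_gt_of_ne h with hneg | hpos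
  · rw [floordiv_sign_neg hneg]
    have hc : c + op = c - (-op).toNat := by omega
    rw [hc, count_down, crossings, if_neg (by omega), hc]
  · rw [floordiv_sign_pos hpos]
    have hc : c + op = c + op.toNat := by omega
    rw [hc, count_up, crossings, if_pos hpos, hc]

lemma foldl_agree (ops : List Int) : ∀ (st : Int × Int), (0 : Int) ∉ ops →
    ops.foldl (fun (st : Int × Int) op =>
      let zeroes_in_op :=
        ((PySem.List.pyRange st.2 (st.2 + op) (PySem.Int.floordiv op |op|)).map
          (fun x => if PySem.Int.mod x 100 = 0 then (1 : Int) else 0)).sum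
      (st.1 + zeroes_in_op, PySem.Int.mod (st.2 + op) 100)) st
    = ops.foldl (fun (st : Int × Int) op =>
      (st.1 + crossings st.2 op, PySem.Int.mod (st.2 + op) 100)) st := by
  induction ops with
  | nil => intro st _; rfl
  | cons op rest ih =>
    intro st hmem
    simp only [List.foldl_cons]
    rw [step_count st.2 op (fun h0 => hmem (h0 ▸ List.mem_cons_self))]
    exact ih _ (fun h => hmem (List.mem_cons_of_mem _ h))

-- ===== VERDICT (by name: the statement is the Claim_ definition above) =====
theorem part_two_spec : Claim_equal_part_two := by
  intro ops _ hpre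
  unfold Spec_part_two part_two part_two_alt
  rw [foldl_agree ops (0, 50) hpre]
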